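-- pv_equiv track=rewrite | github.com/liupengsay/PyIsTheBestLang | src/basis/brute_force/problem.py | lc_1761
-- ===== SOURCE A (Python) =====
-- import math
-- from typing import List
--
-- def lc_1761(n: int, edges: List[List[int]]) -> int:
--     """
--     url: https://leetcode.cn/problems/minimum-degree-of-a-connected-trio-in-a-graph/
--     tag: directed_graph|undirected_graph|brute_force
--     """
--     edges = [[i - 1, j - 1] for i, j in edges]
--     degree = [0] * n
--     dct = [set() for _ in range(n)]
--     directed = [set() for _ in range(n)]
--     for i, j in edges:
--         dct[i].add(j)
--         degree[i] += 1
--         degree[j] += 1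
--         dct[j].add(i)
--     for i, j in edges:
--         if degree[i] < degree[j] or (degree[i] == degree[j] and i < j):
--             directed[i].add(j)
--         else:
--             directed[j].add(i)
--     ans = math.inf
--     for i in range(n):
--         for j in directed[i]:
--             for k in directed[j]:
--                 if k in dct[i]:
--                     x = degree[i] + degree[j] + degree[k] - 6
--                     if x < ans:
--                         ans = x
--     return ans if ans < math.inf else -1
-- ===== SOURCE B (Python) =====
-- def lc_1761(n, edges):
--     deg = [0] * n
--     adj = [set() for _ in range(n)]
--     for u, v in edges:
--         u -= 1
--         v -= 1
--         deg[u] += 1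
--         deg[v] += 1
--         adj[u].add(v)
--         adj[v].add(u)
--     best = None
--     for u in range(n):
--         for v in adj[u]:
--             if v >= u:
--                 for k in adj[u] & adj[v]:
--                     if k >= v:
--                         x = deg[u] + deg[v] + deg[k] - 6
--                         if best is None or x < best:
--                             best = x
--     return -1 if best is None else best
-- ===== Notes on version B (the rewrite author's own statement) =====
-- stated objective: alternative
-- what changed: B drops A's degree-based edge orientation and second pass entirely: it builds degree counts and adjacency sets in one loop and then enumerates each trio exactly once in canonical non-decreasing index order (u <= v <= k, equal indices only through self-loops) via adjacency-set intersection, tracking the minimum with a None sentinel instead of math.inf.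
-- outside the precondition, e.g. on lc_1761(3, [[0, 1], [0, 2], [1, 2]]): A returns 0, B returns -1; on lc_1761(2, [[0, 1]]): A returns -1, B returns -1
import Mathlib
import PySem

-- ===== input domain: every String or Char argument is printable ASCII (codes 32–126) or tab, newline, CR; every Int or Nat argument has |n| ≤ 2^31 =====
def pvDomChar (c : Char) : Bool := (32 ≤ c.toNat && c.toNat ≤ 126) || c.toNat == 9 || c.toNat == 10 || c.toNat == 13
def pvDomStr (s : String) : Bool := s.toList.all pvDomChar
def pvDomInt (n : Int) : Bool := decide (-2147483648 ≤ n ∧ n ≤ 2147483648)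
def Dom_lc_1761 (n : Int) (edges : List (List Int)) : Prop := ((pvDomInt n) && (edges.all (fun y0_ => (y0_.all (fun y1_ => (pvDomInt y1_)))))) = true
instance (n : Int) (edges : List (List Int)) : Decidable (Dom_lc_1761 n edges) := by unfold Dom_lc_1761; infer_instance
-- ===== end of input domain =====

-- B replaces A's degree-orientation triangle enumeration by a direct ordered enumeration
-- (u ≤ v ≤ k over adjacency sets with set intersection, where equal indices require a
-- self-loop, exactly as in A); objective: alternative (same task, genuinely different
-- enumeration strategy, same exact values).

-- ===== PORT A =====
-- Python's int-indexed lists (degree / dct / directed) are ported as total functions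
-- Int → _ updated pointwise (pvUpd); exact for in-range indices, which Pre_lc_1761 guarantees.
def pvUpd {α : Type} (f : Int → α) (i : Int) (v : α) : Int → α :=
  fun j => if j = i then v else f j

-- 'ans = math.inf' / 'if x < ans: ans = x' ported with none for inf (shared by both ports,
-- since both Pythons track a running minimum the same way).
def pvMinStep (o : Option Int) (x : Int) : Option Int :=
  match o with
  | none => some x
  | some a => if x < a then some x else some a

-- '[[i - 1, j - 1] for i, j in edges]'; the catch-all is unreachable under Pre_lc_1761.
def pvPair (e : List Int) : Int × Int :=
  match e with
  | [i, j] => (i - 1, j - 1)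
  | _ => (0, 0)

-- body of A's first loop: dct[i].add(j); degree[i] += 1; degree[j] += 1; dct[j].add(i)
def pvStepA (s : (Int → Int) × (Int → PySem.Set Int)) (p : Int × Int) :
    (Int → Int) × (Int → PySem.Set Int) :=
  let dct1 := pvUpd s.2 p.1 (PySem.Set.add (s.2 p.1) p.2)
  let deg1 := pvUpd s.1 p.1 (s.1 p.1 + 1)
  let deg2 := pvUpd deg1 p.2 (deg1 p.2 + 1)
  let dct2 := pvUpd dct1 p.2 (PySem.Set.add (dct1 p.2) p.1)
  (deg2, dct2)

-- the orientation condition of A's second loop, named so the lemmas can speak about it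
abbrev pvOrd (deg : Int → Int) (a b : Int) : Prop :=
  deg a < deg b ∨ (deg a = deg b ∧ a < b)

-- body of A's second loop: orient each edge from lower (degree, index) to higher
def pvStepDir (deg : Int → Int) (dir : Int → PySem.Set Int) (p : Int × Int) :
    Int → PySem.Set Int :=
  if pvOrd deg p.1 p.2
  then pvUpd dir p.1 (PySem.Set.add (dir p.1) p.2)
  else pvUpd dir p.2 (PySem.Set.add (dir p.2) p.1)

def lc_1761 (n : Int) (edges : List (List Int)) : Int :=
  let es := edges.map pvPair
  let st := es.foldl pvStepA (fun _ => 0, fun _ => PySem.Set.empty)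
  let deg := st.1
  let dct := st.2
  let directed := es.foldl (pvStepDir deg) (fun _ => PySem.Set.empty)
  let ans := (PySem.List.pyRange 0 n 1).foldl (fun ans i =>
      (directed i).foldl (fun ans j =>
        (directed j).foldl (fun ans k =>
          if PySem.Set.contains (dct i) k then pvMinStep ans (deg i + deg j + deg k - 6)
          else ans) ans) ans) none
  match ans with
  | none => -1
  | some a => a

-- ===== PORT B =====
-- body of B's single build loop: deg[u]+=1; deg[v]+=1; adj[u].add(v); adj[v].add(u)
-- (the catch-all is unreachable under Pre_lc_1761: every edge is a two-element list)
def pvStepB (s : (Int → Int) × (Int → PySem.Set Int)) (e : List Int) :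
    (Int → Int) × (Int → PySem.Set Int) :=
  match e with
  | [u0, v0] =>
    let u := u0 - 1
    let v := v0 - 1
    let deg1 := pvUpd s.1 u (s.1 u + 1)
    let deg2 := pvUpd deg1 v (deg1 v + 1)
    let adj1 := pvUpd s.2 u (PySem.Set.add (s.2 u) v)
    let adj2 := pvUpd adj1 v (PySem.Set.add (adj1 v) u)
    (deg2, adj2)
  | _ => s

def lc_1761_alt (n : Int) (edges : List (List Int)) : Int :=
  let st := edges.foldl pvStepB (fun _ => 0, fun _ => PySem.Set.empty)
  let deg := st.1
  let adj := st.2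
  let best := (PySem.List.pyRange 0 n 1).foldl (fun best u =>
      (adj u).foldl (fun best v =>
        if u ≤ v then
          (PySem.Set.inter (adj u) (adj v)).foldl (fun best k =>
            if v ≤ k then pvMinStep best (deg u + deg v + deg k - 6) else best) best
        else best) best) none
  match best with
  | none => -1
  | some b => b

-- ===== PRECONDITION & SPEC =====
-- Pre_ is the problem's natural domain: every edge a two-element list with labels in 1..n.
-- It excludes edges that are not pairs (A raises ValueError on unpacking), labels > n or
-- < 1-n (A raises IndexError), and labels ≤ 0 on which A only returns through Python's
-- negative-index wraparound, an accident of list indexing.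
def Pre_lc_1761 (n : Int) (edges : List (List Int)) : Prop :=
  ∀ e ∈ edges, e.length = 2 ∧ ∀ v ∈ e, 1 ≤ v ∧ v ≤ n
instance (n : Int) (edges : List (List Int)) : Decidable (Pre_lc_1761 n edges) := by
  unfold Pre_lc_1761; infer_instance

def pvWitness_lc_1761 : Int × List (List Int) := (3, [[1, 2], [2, 3], [1, 3]])

def Spec_lc_1761 (n : Int) (edges : List (List Int)) (out : Int) : Prop :=
  out = lc_1761_alt n edges
instance (n : Int) (edges : List (List Int)) (out : Int) : Decidable (Spec_lc_1761 n edges out) := by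
  unfold Spec_lc_1761; infer_instance

-- ===== CLAIM (what is proved, stated in full; the proofs are below) =====
def Claim_equal_lc_1761 : Prop := ∀ (n : Int) (edges : List (List Int)), Dom_lc_1761 n edges → Pre_lc_1761 n edges → Spec_lc_1761 n edges (lc_1761 n edges)

-- ===== LEMMAS AND PROOFS =====

-- ---- adjacency / orientation characterisations ----

def pvAdj (es : List (Int × Int)) (a b : Int) : Prop := (a, b) ∈ es ∨ (b, a) ∈ es

def pvTri (es : List (Int × Int)) (a b c : Int) : Prop :=
  pvAdj es a b ∧ pvAdj es b c ∧ pvAdj es a c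

lemma pvAdj_comm (es : List (Int × Int)) (a b : Int) : pvAdj es a b ↔ pvAdj es b a := by
  unfold pvAdj; tauto

lemma pvOrd_total (deg : Int → Int) (a b : Int) (h : a ≠ b) :
    pvOrd deg a b ∨ pvOrd deg b a := by simp only [pvOrd]; omega

lemma pvOrd_asymm (deg : Int → Int) (a b : Int) (h : pvOrd deg a b) : ¬ pvOrd deg b a := by
  simp only [pvOrd] at *; omega

lemma pvFoldB_eq : ∀ (edges : List (List Int)) (s : (Int → Int) × (Int → PySem.Set Int)),
    (∀ e ∈ edges, e.length = 2) →
    edges.foldl pvStepB s = (edges.map pvPair).foldl pvStepA s := by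
  intro edges
  induction edges with
  | nil => intro s _; rfl
  | cons e t ih =>
    intro s h
    obtain ⟨u, v, rfl⟩ := List.length_eq_two.mp (h e (List.mem_cons_self))
    simp only [List.map_cons, List.foldl_cons]
    rw [show pvStepB s [u, v] = pvStepA s (pvPair [u, v]) from rfl]
    exact ih _ (fun e he => h e (List.mem_cons_of_mem _ he))

lemma pvMem_state2 : ∀ (es : List (Int × Int)) (s : (Int → Int) × (Int → PySem.Set Int))
    (t x : Int),
    x ∈ (es.foldl pvStepA s).2 t ↔ x ∈ s.2 t ∨ (t, x) ∈ es ∨ (x, t) ∈ es := by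
  intro es
  induction es with
  | nil => simp
  | cons p es ih =>
    intro s t x
    rw [List.foldl_cons, ih]
    have hstep : x ∈ (pvStepA s p).2 t ↔
        x ∈ s.2 t ∨ (t = p.1 ∧ x = p.2) ∨ (t = p.2 ∧ x = p.1) := by
      simp only [pvStepA, pvUpd]
      split_ifs with h1 h2 h3 <;>
        simp_all [PySem.Set.mem_add]
    rw [hstep]
    simp only [List.mem_cons, Prod.ext_iff]
    constructor
    · rintro ((h | h | h) | h | h) <;> tauto
    · rintro (h | (h | h) | (h | h)) <;> tauto

lemma pvMem_dct (es : List (Int × Int)) (t x : Int) :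
    x ∈ (es.foldl pvStepA (fun _ => 0, fun _ => PySem.Set.empty)).2 t ↔ pvAdj es t x := by
  rw [pvMem_state2]
  simp [pvAdj, PySem.Set.empty]

lemma pvMem_dir : ∀ (es : List (Int × Int)) (deg : Int → Int) (d0 : Int → PySem.Set Int)
    (t x : Int),
    x ∈ (es.foldl (pvStepDir deg) d0) t ↔ x ∈ d0 t ∨
      ∃ p ∈ es, (pvOrd deg p.1 p.2 ∧ t = p.1 ∧ x = p.2) ∨
                (¬ pvOrd deg p.1 p.2 ∧ t = p.2 ∧ x = p.1) := by
  intro es deg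
  induction es with
  | nil => simp
  | cons p es ih =>
    intro d0 t x
    rw [List.foldl_cons, ih]
    have hstep : x ∈ (pvStepDir deg d0 p) t ↔
        x ∈ d0 t ∨ (pvOrd deg p.1 p.2 ∧ t = p.1 ∧ x = p.2) ∨
                   (¬ pvOrd deg p.1 p.2 ∧ t = p.2 ∧ x = p.1) := by
      simp only [pvStepDir]
      split_ifs with h1
      · simp only [pvUpd]
        split_ifs with ht
        · subst ht
          rw [PySem.Set.mem_add]
          constructor
          · rintro (h | h)
            · exact Or.inl h
            · exact Or.inr (Or.inl ⟨h1, rfl, h⟩)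
          · rintro (h | ⟨_, _, h⟩ | ⟨hno, _, _⟩)
            · exact Or.inl h
            · exact Or.inr h
            · exact absurd h1 hno
        · constructor
          · exact fun h => Or.inl h
          · rintro (h | ⟨_, ht', _⟩ | ⟨hno, _, _⟩)
            · exact h
            · exact absurd ht' ht
            · exact absurd h1 hno
      · simp only [pvUpd]
        split_ifs with ht
        · subst ht
          rw [PySem.Set.mem_add]
          constructor
          · rintro (h | h)
            · exact Or.inl h
            · exact Or.inr (Or.inr ⟨h1, rfl, h⟩)
          · rintro (h | ⟨ho, _, _⟩ | ⟨_, _, h⟩)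
            · exact Or.inl h
            · exact absurd ho h1
            · exact Or.inr h
        · constructor
          · exact fun h => Or.inl h
          · rintro (h | ⟨ho, _, _⟩ | ⟨_, ht', _⟩)
            · exact h
            · exact absurd ho h1
            · exact absurd ht' ht
    rw [hstep]
    simp only [List.mem_cons]
    constructor
    · rintro ((h | h | h) | ⟨p', hp', h⟩)
      · exact Or.inl h
      · exact Or.inr ⟨p, Or.inl rfl, Or.inl h⟩
      · exact Or.inr ⟨p, Or.inl rfl, Or.inr h⟩
      · exact Or.inr ⟨p', Or.inr hp', h⟩
    · rintro (h | ⟨p', (rfl | hp'), h⟩)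
      · exact Or.inl (Or.inl h)
      · rcases h with h | h
        · exact Or.inl (Or.inr (Or.inl h))
        · exact Or.inl (Or.inr (Or.inr h))
      · exact Or.inr ⟨p', hp', h⟩

lemma pvOrd_irrefl (deg : Int → Int) (a : Int) : ¬ pvOrd deg a a := by
  simp only [pvOrd]; omega

lemma pvMem_dir' (es : List (Int × Int)) (deg : Int → Int) (t x : Int) :
    x ∈ (es.foldl (pvStepDir deg) (fun _ => PySem.Set.empty)) t ↔
      pvAdj es t x ∧ (pvOrd deg t x ∨ t = x) := by
  rw [pvMem_dir]
  simp only [PySem.Set.empty, List.not_mem_nil, false_or]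
  constructor
  · rintro ⟨p, hp, ⟨h, rfl, rfl⟩ | ⟨h, rfl, rfl⟩⟩
    · exact ⟨Or.inl hp, Or.inl h⟩
    · refine ⟨Or.inr hp, ?_⟩
      rcases eq_or_ne p.2 p.1 with he | hne
      · exact Or.inr he
      · rcases pvOrd_total deg p.1 p.2 (Ne.symm hne) with h' | h'
        · exact absurd h' h
        · exact Or.inl h'
  · rintro ⟨hadj, hord⟩
    rcases hadj with hmem | hmem
    · by_cases h : pvOrd deg t x
      · exact ⟨(t, x), hmem, Or.inl ⟨h, rfl, rfl⟩⟩
      · rcases hord with h' | h'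
        · exact absurd h' h
        · exact ⟨(t, x), hmem, Or.inr ⟨h, h', h' ▸ rfl⟩⟩
    · refine ⟨(x, t), hmem, Or.inr ⟨?_, rfl, rfl⟩⟩
      rcases hord with h' | h'
      · exact pvOrd_asymm deg t x h'
      · exact h' ▸ pvOrd_irrefl deg x

lemma pvAdj_bounds (n : Int) (edges : List (List Int)) (hPre : Pre_lc_1761 n edges)
    (a b : Int) (h : pvAdj (edges.map pvPair) a b) :
    0 ≤ a ∧ a < n ∧ 0 ≤ b ∧ b < n := by
  rcases h with h | h <;>
  · rw [List.mem_map] at h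
    obtain ⟨e, he, hpe⟩ := h
    obtain ⟨hlen, hbd⟩ := hPre e he
    obtain ⟨u, v, rfl⟩ := List.length_eq_two.mp hlen
    have hu := hbd u (by simp)
    have hv := hbd v (by simp)
    simp only [pvPair, Prod.mk.injEq] at hpe
    omega

lemma pvTri_orient (es : List (Int × Int)) (deg : Int → Int) (r : Int → Int → Prop)
    (htot : ∀ a b, r a b ∨ r b a)
    (a b c : Int) (ht : pvTri es a b c) :
    ∃ i j k, r i j ∧ r j k ∧ pvTri es i j k ∧
      deg i + deg j + deg k = deg a + deg b + deg c := by
  obtain ⟨t1, t2, t3⟩ := ht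
  rcases htot a b with h1 | h1 <;> rcases htot b c with h2 | h2 <;>
    rcases htot a c with h3 | h3
  · exact ⟨a, b, c, h1, h2, ⟨t1, t2, t3⟩, by ring⟩
  · exact ⟨a, b, c, h1, h2, ⟨t1, t2, t3⟩, by ring⟩
  · exact ⟨a, c, b, h3, h2, ⟨t3, (pvAdj_comm es b c).mp t2, t1⟩, by ring⟩
  · exact ⟨c, a, b, h3, h1, ⟨(pvAdj_comm es a c).mp t3, t1, (pvAdj_comm es b c).mp t2⟩, by ring⟩
  · exact ⟨b, a, c, h1, h3, ⟨(pvAdj_comm es a b).mp t1, t3, t2⟩, by ring⟩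
  · exact ⟨b, c, a, h2, h3, ⟨t2, (pvAdj_comm es a c).mp t3, (pvAdj_comm es a b).mp t1⟩, by ring⟩
  · exact ⟨c, b, a, h2, h1, ⟨(pvAdj_comm es b c).mp t2, (pvAdj_comm es a b).mp t1, (pvAdj_comm es a c).mp t3⟩, by ring⟩
  · exact ⟨c, b, a, h2, h1, ⟨(pvAdj_comm es b c).mp t2, (pvAdj_comm es a b).mp t1, (pvAdj_comm es a c).mp t3⟩, by ring⟩

-- ---- minimum-fold algebra ----

def pvOmin (a b : Option Int) : Option Int :=
  match a, b with
  | none, b => b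
  | some x, none => some x
  | some x, some y => some (min x y)

def pvMfold (l : List Int) : Option Int := l.foldl pvMinStep none

lemma pvMinStep_eq (o : Option Int) (x : Int) : pvMinStep o x = pvOmin o (some x) := by
  cases o with
  | none => rfl
  | some a =>
    simp only [pvMinStep, pvOmin]
    split_ifs with h <;> simp [min_def] <;> omega

lemma pvOmin_assoc (a b c : Option Int) :
    pvOmin (pvOmin a b) c = pvOmin a (pvOmin b c) := by
  cases a <;> cases b <;> cases c <;> simp [pvOmin, min_assoc]

lemma pvFoldl_omin : ∀ (l : List Int) (o : Option Int),
    l.foldl pvMinStep o = pvOmin o (pvMfold l) := by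
  intro l
  induction l with
  | nil => intro o; cases o <;> rfl
  | cons x l ih =>
    intro o
    have hm : pvMfold (x :: l) = pvOmin (some x) (pvMfold l) := by
      show l.foldl pvMinStep (pvMinStep none x) = _
      rw [show pvMinStep none x = some x from rfl, ih (some x)]
    rw [hm, List.foldl_cons, ih (pvMinStep o x), pvMinStep_eq, pvOmin_assoc]

lemma pvMfold_cons (x : Int) (l : List Int) :
    pvMfold (x :: l) = pvOmin (some x) (pvMfold l) := by
  show l.foldl pvMinStep (pvMinStep none x) = _
  rw [show pvMinStep none x = some x from rfl, pvFoldl_omin]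

lemma pvMfold_eq_none : ∀ (l : List Int), pvMfold l = none ↔ l = [] := by
  intro l
  cases l with
  | nil => simp [pvMfold]
  | cons x l =>
    rw [pvMfold_cons]
    cases pvMfold l <;> simp [pvOmin]

lemma pvMfold_min : ∀ (l : List Int) (m : Int), pvMfold l = some m →
    m ∈ l ∧ ∀ x ∈ l, m ≤ x := by
  intro l
  induction l with
  | nil => intro m h; simp [pvMfold] at h
  | cons x l ih =>
    intro m h
    rw [pvMfold_cons] at h
    cases hl : pvMfold l with
    | none =>
      rw [hl] at h
      have : l = [] := (pvMfold_eq_none l).mp hl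
      subst this
      simp [pvOmin] at h
      simp [h]
    | some b =>
      rw [hl] at h
      simp only [pvOmin, Option.some.injEq] at h
      obtain ⟨hb, hlb⟩ := ih b hl
      constructor
      · rcases le_total x b with hxb | hxb
        · have hm : m = x := by rw [← h, min_eq_left hxb]
          rw [hm]; simp
        · have hm : m = b := by rw [← h, min_eq_right hxb]
          rw [hm]; exact List.mem_cons_of_mem _ hb
      · intro y hy
        have h1 := min_le_left x b
        have h2 := min_le_right x b
        rcases List.mem_cons.mp hy with rfl | hy
        · omega
        · have := hlb y hy; omega

lemma pvMfold_ext (l1 l2 : List Int) (h : ∀ x, x ∈ l1 ↔ x ∈ l2) :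
    pvMfold l1 = pvMfold l2 := by
  cases h1 : pvMfold l1 with
  | none =>
    have : l1 = [] := (pvMfold_eq_none l1).mp h1
    subst this
    cases h2 : pvMfold l2 with
    | none => rfl
    | some m =>
      have hm := (pvMfold_min l2 m h2).1
      exact absurd ((h m).mpr hm) (List.not_mem_nil)
  | some m1 =>
    obtain ⟨hm1, hlb1⟩ := pvMfold_min l1 m1 h1
    cases h2 : pvMfold l2 with
    | none =>
      have : l2 = [] := (pvMfold_eq_none l2).mp h2
      subst this
      exact absurd ((h m1).mp hm1) (List.not_mem_nil)
    | some m2 =>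
      obtain ⟨hm2, hlb2⟩ := pvMfold_min l2 m2 h2
      have g1 := hlb1 m2 ((h m2).mpr hm2)
      have g2 := hlb2 m1 ((h m1).mp hm1)
      simp only [Option.some.injEq]
      omega

-- ---- fold-shape lemmas (nested guarded min-loops as one flat list) ----

lemma pvFoldA_inner (dcti : PySem.Set Int) (v : Int → Int) :
    ∀ (S : List Int) (o : Option Int),
    S.foldl (fun a k => if PySem.Set.contains dcti k then pvMinStep a (v k) else a) o =
    (S.filterMap (fun k => if PySem.Set.contains dcti k then some (v k) else none)).foldl
      pvMinStep o := by
  intro S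
  induction S with
  | nil => intro o; rfl
  | cons k S ih =>
    intro o
    rw [List.foldl_cons, List.filterMap_cons]
    by_cases h : PySem.Set.contains dcti k = true
    · simp only [if_pos h, List.foldl_cons]
      exact ih _
    · simp only [if_neg h]
      exact ih _

lemma pvFoldB_inner (b : Int) (v : Int → Int) :
    ∀ (L : List Int) (o : Option Int),
    L.foldl (fun a k => if b ≤ k then pvMinStep a (v k) else a) o =
    (L.filterMap (fun k => if b ≤ k then some (v k) else none)).foldl pvMinStep o := by
  intro L
  induction L with
  | nil => intro o; rfl
  | cons k L ih =>
    intro o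
    rw [List.foldl_cons, List.filterMap_cons]
    by_cases h : b ≤ k
    · simp only [if_pos h, List.foldl_cons]
      exact ih _
    · simp only [if_neg h]
      exact ih _

lemma pvFoldl_flat (g : Int → List Int) :
    ∀ (l : List Int) (o : Option Int),
    l.foldl (fun a i => (g i).foldl pvMinStep a) o = (l.flatMap g).foldl pvMinStep o := by
  intro l
  induction l with
  | nil => intro o; rfl
  | cons i l ih =>
    intro o
    rw [List.foldl_cons, ih, List.flatMap_cons, List.foldl_append]

lemma pvFoldl_ite (P : Prop) [Decidable P] (L : List Int) (o : Option Int) :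
    (if P then L.foldl pvMinStep o else o) = (if P then L else []).foldl pvMinStep o := by
  split_ifs <;> rfl

-- ---- the two candidate lists (the nested min-loops, flattened) ----

def pvCandA (n : Int) (edges : List (List Int)) : List Int :=
  let es := edges.map pvPair
  let st := es.foldl pvStepA (fun _ => 0, fun _ => PySem.Set.empty)
  let deg := st.1
  let dct := st.2
  let directed := es.foldl (pvStepDir deg) (fun _ => PySem.Set.empty)
  (PySem.List.pyRange 0 n 1).flatMap (fun i =>
    (directed i).flatMap (fun j =>
      (directed j).filterMap (fun k =>
        if PySem.Set.contains (dct i) k then some (deg i + deg j + deg k - 6) else none)))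

def pvCandB (n : Int) (edges : List (List Int)) : List Int :=
  let st := edges.foldl pvStepB (fun _ => 0, fun _ => PySem.Set.empty)
  let deg := st.1
  let adj := st.2
  (PySem.List.pyRange 0 n 1).flatMap (fun u =>
    (adj u).flatMap (fun v =>
      if u ≤ v then
        (PySem.Set.inter (adj u) (adj v)).filterMap (fun k =>
          if v ≤ k then some (deg u + deg v + deg k - 6) else none)
      else []))

lemma pvA_eq_mfold (n : Int) (edges : List (List Int)) :
    lc_1761 n edges =
      match pvMfold (pvCandA n edges) with
      | none => -1
      | some a => a := by
  simp only [lc_1761, pvCandA, pvMfold, pvFoldA_inner, pvFoldl_flat]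

lemma pvB_eq_mfold (n : Int) (edges : List (List Int)) :
    lc_1761_alt n edges =
      match pvMfold (pvCandB n edges) with
      | none => -1
      | some b => b := by
  simp only [lc_1761_alt, pvCandB, pvMfold, pvFoldB_inner, pvFoldl_ite, pvFoldl_flat]

-- ---- membership in the two candidate lists is the same ----

lemma pvMemIff (n : Int) (edges : List (List Int)) (hPre : Pre_lc_1761 n edges) (x : Int) :
    x ∈ pvCandA n edges ↔ x ∈ pvCandB n edges := by
  have hlen : ∀ e ∈ edges, e.length = 2 := fun e he => (hPre e he).1
  have hstate := pvFoldB_eq edges (fun _ => 0, fun _ => PySem.Set.empty) hlen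
  simp only [pvCandA, pvCandB, hstate, List.mem_flatMap, List.mem_filterMap,
    List.mem_ite_nil_right, Option.ite_none_right_eq_some, Option.some.injEq,
    PySem.List.mem_pyRange_one, PySem.Set.mem_inter, PySem.Set.contains_iff,
    pvMem_dir', pvMem_dct]
  set dg := (List.foldl pvStepA (fun _ => (0 : Int), fun _ => (PySem.Set.empty : PySem.Set Int))
    (List.map pvPair edges)).1 with hdg
  have htot1 : ∀ a b : Int, (pvOrd dg a b ∨ a = b) ∨ (pvOrd dg b a ∨ b = a) := by
    intro a b
    rcases eq_or_ne a b with h | h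
    · exact Or.inl (Or.inr h)
    · rcases pvOrd_total dg a b h with h' | h'
      · exact Or.inl (Or.inl h')
      · exact Or.inr (Or.inl h')
  constructor
  · rintro ⟨i, ⟨hi0, hin⟩, j, ⟨haij, hoij⟩, k, ⟨hajk, hojk⟩, haik, hx⟩
    obtain ⟨u, v, w, huv, hvw, ⟨t1, t2, t3⟩, hsum⟩ :=
      pvTri_orient (edges.map pvPair) dg (· ≤ ·) (fun a b => le_total a b)
        i j k ⟨haij, hajk, haik⟩
    have hb := pvAdj_bounds n edges hPre u v t1
    exact ⟨u, ⟨hb.1, hb.2.1⟩, v, t1, huv, w, ⟨t3, t2⟩, hvw, by omega⟩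
  · rintro ⟨u, ⟨hu0, hun⟩, v, hauv, huv, w, ⟨hauw, havw⟩, hvw, hx⟩
    obtain ⟨i, j, k, hoij, hojk, ⟨t1, t2, t3⟩, hsum⟩ :=
      pvTri_orient (edges.map pvPair) dg (fun a b => pvOrd dg a b ∨ a = b) htot1
        u v w ⟨hauv, havw, hauw⟩
    have hb := pvAdj_bounds n edges hPre i j t1
    exact ⟨i, ⟨hb.1, hb.2.1⟩, j, ⟨t1, hoij⟩, k, ⟨t2, hojk⟩, t3, by omega⟩

-- ---- main equivalence ----

theorem pv_key_eq (n : Int) (edges : List (List Int)) (hPre : Pre_lc_1761 n edges) :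
    lc_1761 n edges = lc_1761_alt n edges := by
  rw [pvA_eq_mfold, pvB_eq_mfold,
    pvMfold_ext (pvCandA n edges) (pvCandB n edges) (pvMemIff n edges hPre)]

-- ===== VERDICT (by name: the statement is the Claim_ definition above) =====
theorem lc_1761_spec : Claim_equal_lc_1761 := by
  intro n edges _hDom hPre
  exact pv_key_eq n edges hPre
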